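-- pv_equiv track=rewrite | github.com/dlawre14/machinelearning | langtrigrams/trigram.py | distLang
-- ===== SOURCE A (Python) =====
-- def distLang(l1, l2):
--     '''
--     l1, l2 are dictionaries of words and trigrams
--     '''
--     dist = 0
--     keys = set()
--
--     for key in l1:
--         keys.add(key)
--     for key in l2:
--         keys.add(key)
--
--     for key in keys:
--         dist += abs(l1.get(key,0) - l2.get(key,0))
--
--     return dist
-- ===== SOURCE B (Python) =====
-- def distLang(l1, l2):
--     '''
--     l1, l2 are dictionaries of words and trigrams
--     '''
--     dist = 0
--     for key, v in l1.items():
--         dist += abs(v - l2.get(key, 0))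
--     for key, v in l2.items():
--         if key not in l1:
--             dist += abs(v)
--     return dist
-- ===== Notes on version B (the rewrite author's own statement) =====
-- stated objective: simpler
-- what changed: Replaces A's build-a-union-set-then-scan with two direct passes over the dict items (l1 pass uses abs difference against l2.get, l2 pass adds abs(v) only for keys absent from l1), maintaining no auxiliary set; Pre_ excludes association lists with duplicate keys, which cannot represent a Python dict.
import Mathlib
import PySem

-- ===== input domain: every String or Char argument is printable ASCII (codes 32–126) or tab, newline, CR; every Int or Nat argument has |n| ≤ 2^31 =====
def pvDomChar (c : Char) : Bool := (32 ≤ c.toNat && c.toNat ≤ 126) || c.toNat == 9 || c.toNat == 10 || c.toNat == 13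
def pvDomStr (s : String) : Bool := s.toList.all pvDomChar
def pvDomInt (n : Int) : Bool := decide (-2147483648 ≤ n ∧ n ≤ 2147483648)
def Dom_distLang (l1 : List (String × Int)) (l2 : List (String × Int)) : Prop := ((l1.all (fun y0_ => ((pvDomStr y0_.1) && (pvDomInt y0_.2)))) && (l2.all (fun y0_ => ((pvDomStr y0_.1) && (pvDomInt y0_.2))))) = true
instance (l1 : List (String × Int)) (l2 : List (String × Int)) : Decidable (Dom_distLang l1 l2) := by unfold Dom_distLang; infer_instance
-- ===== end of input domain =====

-- B replaces A's build-a-union-set-then-scan with two direct passes over the items lists (simpler, no auxiliary set).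


-- ===== PORT A =====
def distLang (l1 : List (String × Int)) (l2 : List (String × Int)) : Int :=
  -- dist = 0; keys = set(); for key in l1: keys.add(key); for key in l2: keys.add(key)
  let keys : PySem.Set String :=
    (l2.map Prod.fst).foldl PySem.Set.add
      ((l1.map Prod.fst).foldl PySem.Set.add PySem.Set.empty)
  -- for key in keys: dist += abs(l1.get(key,0) - l2.get(key,0))   (a sum over the set: order-independent)
  keys.foldl (fun dist key =>
    dist + |PySem.Dict.getD (PySem.Dict.mk l1) key 0 - PySem.Dict.getD (PySem.Dict.mk l2) key 0|) 0

-- ===== PORT B =====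
def distLang_alt (l1 : List (String × Int)) (l2 : List (String × Int)) : Int :=
  -- dist = 0; for key, v in l1.items(): dist += abs(v - l2.get(key, 0))
  let dist1 : Int := l1.foldl (fun dist kv =>
    dist + |kv.2 - PySem.Dict.getD (PySem.Dict.mk l2) kv.1 0|) 0
  -- for key, v in l2.items(): if key not in l1: dist += abs(v)
  l2.foldl (fun dist kv =>
    if !(PySem.Dict.contains (PySem.Dict.mk l1) kv.1) then dist + |kv.2| else dist) dist1

-- ===== PRECONDITION & SPEC =====
-- Pre_ excludes association lists with duplicate keys: the parameters are Python dicts, which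
-- always have distinct keys, so a duplicate-key list does not represent any Python input.
def Pre_distLang (l1 : List (String × Int)) (l2 : List (String × Int)) : Prop :=
  (l1.map Prod.fst).Nodup ∧ (l2.map Prod.fst).Nodup
instance (l1 : List (String × Int)) (l2 : List (String × Int)) : Decidable (Pre_distLang l1 l2) := by unfold Pre_distLang; infer_instance
def pvWitness_distLang : (List (String × Int)) × (List (String × Int)) :=
  ([("abc", 2), ("de", 1)], [("abc", 1), ("xy", 3)])
def Spec_distLang (l1 : List (String × Int)) (l2 : List (String × Int)) (out : Int) : Prop := out = distLang_alt l1 l2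
instance (l1 : List (String × Int)) (l2 : List (String × Int)) (out : Int) : Decidable (Spec_distLang l1 l2 out) := by unfold Spec_distLang; infer_instance

-- ===== CLAIM (what is proved, stated in full; the proofs are below) =====
def Claim_equal_distLang : Prop := ∀ (l1 : List (String × Int)) (l2 : List (String × Int)), Dom_distLang l1 l2 → Pre_distLang l1 l2 → Spec_distLang l1 l2 (distLang l1 l2)

-- ===== LEMMAS AND PROOFS =====

-- Adding a Nodup batch of elements to a set appends exactly the fresh ones, in order.
lemma foldl_add_nodup (ys : List String) (s : PySem.Set String) (h : ys.Nodup) :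
    ys.foldl PySem.Set.add s = s ++ ys.filter (fun y => !s.contains y) := by
  induction ys generalizing s with
  | nil => simp
  | cons y ys ih =>
    have hy : y ∉ ys := (List.nodup_cons.mp h).1
    have hys : ys.Nodup := (List.nodup_cons.mp h).2
    simp only [List.foldl_cons]
    by_cases hc : s.contains y = true
    · have hmem : y ∈ s := by simpa using hc
      have hadd : PySem.Set.add s y = s := by
        simp [PySem.Set.add, PySem.Set.contains, hmem]
      rw [hadd, ih s hys]
      simp [hmem]
    · have hmem : y ∉ s := by simpa using hc
      have hadd : PySem.Set.add s y = s ++ [y] := by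
        simp [PySem.Set.add, PySem.Set.contains, hmem]
      rw [hadd, ih _ hys]
      have hf : ys.filter (fun z => !(s ++ [y]).contains z)
          = ys.filter (fun z => !s.contains z) := by
        apply List.filter_congr
        intro z hz
        have hzy : z ≠ y := fun e => hy (e ▸ hz)
        simp [hzy]
      rw [hf]
      simp [hmem, List.append_assoc]

lemma dict_contains_mk_eq (l : List (String × Int)) (k : String) :
    PySem.Dict.contains (PySem.Dict.mk l) k = (l.map Prod.fst).contains k := by
  rw [PySem.Dict.contains_eq_decide_mem_keys]
  by_cases hk : k ∈ l.map Prod.fst <;> simp [PySem.Dict.keys, hk]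

lemma distLang_eq (l1 l2 : List (String × Int))
    (h1 : (l1.map Prod.fst).Nodup) (h2 : (l2.map Prod.fst).Nodup) :
    distLang l1 l2 = distLang_alt l1 l2 := by
  have hnd1 : (PySem.Dict.mk l1).keys.Nodup := by simpa [PySem.Dict.keys] using h1
  have hnd2 : (PySem.Dict.mk l2).keys.Nodup := by simpa [PySem.Dict.keys] using h2
  have hg1 : ∀ kv ∈ l1, PySem.Dict.getD (PySem.Dict.mk l1) kv.1 0 = kv.2 := by
    intro kv hkv
    apply PySem.Dict.getD_of_mem_items
    · simpa using hkv
    · exact hnd1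
  have hg2 : ∀ kv ∈ l2, PySem.Dict.getD (PySem.Dict.mk l2) kv.1 0 = kv.2 := by
    intro kv hkv
    apply PySem.Dict.getD_of_mem_items
    · simpa using hkv
    · exact hnd2
  have hk1 : (l1.map Prod.fst).foldl PySem.Set.add PySem.Set.empty = l1.map Prod.fst := by
    rw [foldl_add_nodup _ _ h1]
    simp [PySem.Set.empty]
  -- A = sum over l1's keys + sum over l2's keys missing from l1
  have hA : distLang l1 l2
      = ((l1.map Prod.fst).map (fun k => |PySem.Dict.getD (PySem.Dict.mk l1) k 0 - PySem.Dict.getD (PySem.Dict.mk l2) k 0|)).sum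
        + (((l2.map Prod.fst).filter (fun y => !(l1.map Prod.fst).contains y)).map
            (fun k => |PySem.Dict.getD (PySem.Dict.mk l1) k 0 - PySem.Dict.getD (PySem.Dict.mk l2) k 0|)).sum := by
    simp only [distLang]
    rw [hk1, foldl_add_nodup _ _ h2, PySem.List.foldl_add]
    simp
  have hB : distLang_alt l1 l2
      = (l1.map (fun kv => |kv.2 - PySem.Dict.getD (PySem.Dict.mk l2) kv.1 0|)).sum
        + ((l2.filter (fun kv => !PySem.Dict.contains (PySem.Dict.mk l1) kv.1)).map (fun kv => |kv.2|)).sum := by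
    simp only [distLang_alt]
    rw [PySem.List.foldl_if_eq_foldl_filter
          (p := fun kv : String × Int => !PySem.Dict.contains (PySem.Dict.mk l1) kv.1)
          (f := fun (dist : Int) (kv : String × Int) => dist + |kv.2|),
        PySem.List.foldl_add, PySem.List.foldl_add]
    ring
  rw [hA, hB]
  congr 1
  · rw [List.map_map]
    apply congrArg
    apply List.map_congr_left
    intro kv hkv
    simp only [Function.comp]
    rw [hg1 kv hkv]
  · rw [List.filter_map, List.map_map]
    have hpred : (l2.filter (fun kv => !PySem.Dict.contains (PySem.Dict.mk l1) kv.1))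
        = l2.filter ((fun y => !(l1.map Prod.fst).contains y) ∘ Prod.fst) := by
      apply List.filter_congr
      intro kv _
      simp only [Function.comp]
      rw [dict_contains_mk_eq]
    rw [← hpred]
    apply congrArg
    apply List.map_congr_left
    intro kv hkv
    obtain ⟨hmem, hcond⟩ := List.mem_filter.mp hkv
    have hnc : PySem.Dict.contains (PySem.Dict.mk l1) kv.1 = false := by
      simpa using hcond
    simp only [Function.comp]
    have h0 : PySem.Dict.getD (PySem.Dict.mk l1) kv.1 0 = 0 := by
      exact PySem.Dict.getD_of_not_contains _ _ hnc
    rw [h0, hg2 kv hmem]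
    simp

-- ===== VERDICT (by name: the statement is the Claim_ definition above) =====
theorem distLang_spec : Claim_equal_distLang := by
  intro l1 l2 _ hpre
  exact distLang_eq l1 l2 hpre.1 hpre.2
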